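-- pv_equiv track=rewrite | github.com/Leandro-Cardoso/UNIVASSOURAS-Biblioteca-CMD | sort.py | bucket_sorter
-- ===== SOURCE A (Python) =====
-- def bucket_sorter(strings:list, c:int) -> list:
--     # Criar buckets:
--     n_buckets = 128
--     buckets = [[] for i in range(n_buckets)]
--     # Pegar o caracter na mesma posição de cada string e colocar no bucket correspondente:
--     for string in strings:
--         b = ord(string[c])
--         buckets[b].append(string)
--     # Concatenar buckets em uma lista:
--     result = []
--     for bucket in buckets:
--         result += bucket
--     return result
-- ===== SOURCE B (Python) =====
-- def bucket_sorter(strings: list, c: int) -> list: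
--     # Different decomposition: one stable filter pass per possible key (0..127)
--     # instead of distributing into 128 buckets and concatenating.
--     result = []
--     for b in range(128):
--         result += [s for s in strings if ord(s[c]) == b]
--     return result
-- ===== Notes on version B (the rewrite author's own statement) =====
-- stated objective: alternative
-- what changed: B replaces A's single distribution pass into 128 bucket lists (then concatenation) by 128 stable filter passes over the input, one per possible key in ascending order, appended directly to the result.
import Mathlib
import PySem

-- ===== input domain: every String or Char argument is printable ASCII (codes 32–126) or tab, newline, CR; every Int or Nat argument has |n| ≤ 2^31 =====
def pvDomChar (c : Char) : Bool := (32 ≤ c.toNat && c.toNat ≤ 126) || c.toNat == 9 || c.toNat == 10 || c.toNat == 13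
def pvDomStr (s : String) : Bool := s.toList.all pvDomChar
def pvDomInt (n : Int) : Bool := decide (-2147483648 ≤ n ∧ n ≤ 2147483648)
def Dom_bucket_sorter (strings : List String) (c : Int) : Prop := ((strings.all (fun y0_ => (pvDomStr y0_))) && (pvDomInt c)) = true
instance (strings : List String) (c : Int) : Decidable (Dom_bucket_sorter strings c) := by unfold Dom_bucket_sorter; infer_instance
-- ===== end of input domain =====

-- B replaces A's one-pass distribution into 128 buckets by 128 stable filter passes,
-- one per key, appended in key order (objective: alternative decomposition; not faster).

-- ===== PORT A =====
-- one loop step: b = ord(string[c]); buckets[b].append(string)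
-- (s[c] out of range → Python raises, excluded by Pre_; ord ≥ 128 → raises, impossible inside Dom)
def bucketStep (c : Int) (bs : List (List String)) (s : String) : List (List String) :=
  match PySem.Str.pyGet? s c with
  | some ch => bs.set ch.toNat ((bs.getD ch.toNat []) ++ [s])
  | none => bs

def bucket_sorter (strings : List String) (c : Int) : List String :=
  let buckets := (List.range 128).map (fun _ => ([] : List String))
  let buckets := strings.foldl (bucketStep c) buckets
  buckets.foldl (fun result bucket => result ++ bucket) []

-- ===== PORT B =====
-- the comprehension's test 'ord(s[c]) == b'
def keyIs (c : Int) (b : Int) (s : String) : Bool :=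
  match PySem.Str.pyGet? s c with
  | some ch => (ch.toNat : Int) == b
  | none => false

def bucket_sorter_alt (strings : List String) (c : Int) : List String :=
  (PySem.List.pyRange 0 128 1).foldl
    (fun result b => result ++ strings.filter (keyIs c b)) []

-- ===== PRECONDITION & SPEC =====
-- Pre_ excludes exactly the inputs where Python's string[c] raises IndexError:
-- some string whose length makes index c invalid.
def Pre_bucket_sorter (strings : List String) (c : Int) : Prop :=
  ∀ s ∈ strings, -(s.toList.length : Int) ≤ c ∧ c < (s.toList.length : Int)
instance (strings : List String) (c : Int) : Decidable (Pre_bucket_sorter strings c) := by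
  unfold Pre_bucket_sorter; infer_instance

def pvWitness_bucket_sorter : List String × Int := (["ba", "ab", "aa"], 1)

def Spec_bucket_sorter (strings : List String) (c : Int) (out : List String) : Prop := out = bucket_sorter_alt strings c
instance (strings : List String) (c : Int) (out : List String) : Decidable (Spec_bucket_sorter strings c out) := by unfold Spec_bucket_sorter; infer_instance

-- ===== CLAIM (what is proved, stated in full; the proofs are below) =====
def Claim_equal_bucket_sorter : Prop := ∀ (strings : List String) (c : Int), Dom_bucket_sorter strings c → Pre_bucket_sorter strings c → Spec_bucket_sorter strings c (bucket_sorter strings c)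

-- ===== LEMMAS AND PROOFS =====

-- s[i] with a Python index in range returns a character
lemma pyGet?_some_of_inrange (cs : List Char) (i : Int)
    (h1 : -(cs.length : Int) ≤ i) (h2 : i < (cs.length : Int)) :
    ∃ ch, PySem.List.pyGet? cs i = some ch := by
  rw [← Option.isSome_iff_exists]
  simp only [PySem.List.pyGet?, PySem.List.pyIdx?]
  split_ifs
  · have hk : i.toNat < cs.length := by omega
    simp [getElem?_pos, hk]
  · have hk : cs.length - (-i).toNat < cs.length := by omega
    simp [getElem?_pos, hk]

-- setting slot k of a bucket table that is a map over range n
lemma set_map_range (n k : Nat) (f : Nat → List String) (v : List String) (_hk : k < n) :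
    ((List.range n).map f).set k v
      = (List.range n).map (fun i => if i = k then v else f i) := by
  apply List.ext_getElem
  · simp
  · intro i h1 h2
    simp only [List.getElem_set, List.getElem_map, List.getElem_range]
    rcases eq_or_ne k i with hki | hki
    · simp [hki]
    · simp [hki, Ne.symm hki]

lemma getD_map_range (n k : Nat) (f : Nat → List String) (_hk : k < n) :
    ((List.range n).map f).getD k [] = f k := by
  rw [List.getD_eq_getElem _ _ (by simpa using _hk)]
  simp

-- the distribution loop keeps each slot equal to a filter of the processed prefix
lemma buckets_invariant (c : Int) (l : List String) (f : Nat → List String)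
    (h : ∀ s ∈ l, ∃ ch, PySem.Str.pyGet? s c = some ch ∧ ch.toNat < 128) :
    l.foldl (bucketStep c) ((List.range 128).map f)
      = (List.range 128).map (fun i => f i ++ l.filter (keyIs c (i : Int))) := by
  induction l generalizing f with
  | nil =>
    simp only [List.foldl_nil, List.filter_nil, List.append_nil]
  | cons s l ih =>
    obtain ⟨ch, hch, hlt⟩ := h s (List.mem_cons_self ..)
    have hstep : bucketStep c ((List.range 128).map f) s
        = (List.range 128).map (fun i => if i = ch.toNat then f i ++ [s] else f i) := by
      unfold bucketStep
      rw [hch]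
      dsimp only []
      rw [getD_map_range _ _ _ hlt, set_map_range _ _ _ _ hlt]
      exact List.map_congr_left (fun i _ => by
        by_cases hik : i = ch.toNat <;> simp [hik])
    rw [List.foldl_cons, hstep,
        ih (fun i => if i = ch.toNat then f i ++ [s] else f i)
           (fun t ht => h t (List.mem_cons_of_mem _ ht))]
    apply List.map_congr_left
    intro i _
    by_cases hik : i = ch.toNat
    · have hk : keyIs c (i : Int) s = true := by
        unfold keyIs; rw [hch]; dsimp only []; simp [hik]
      subst hik
      simp [hk, List.append_assoc]
    · have hk : keyIs c (i : Int) s = false := by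
        unfold keyIs; rw [hch]; dsimp only []
        simp only [beq_eq_false_iff_ne, ne_eq, Int.natCast_inj]
        omega
      simp [hk, hik]

lemma dom_key_lt (strings : List String) (c : Int) (hd : Dom_bucket_sorter strings c)
    (hp : Pre_bucket_sorter strings c) :
    ∀ s ∈ strings, ∃ ch, PySem.Str.pyGet? s c = some ch ∧ ch.toNat < 128 := by
  intro s hs
  obtain ⟨h1, h2⟩ := hp s hs
  obtain ⟨ch, hch'⟩ := pyGet?_some_of_inrange s.toList c h1 h2
  have hch : PySem.Str.pyGet? s c = some ch := by
    simpa [PySem.Str.pyGet?, PySem.Chars.pyGet?] using hch' 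
  refine ⟨ch, hch, ?_⟩
  have hmem : ch ∈ s.toList := by
    have : PySem.Chars.pyGet? s.toList c = some ch := by
      simpa [PySem.Str.pyGet?] using hch
    exact PySem.List.mem_of_pyGet?_eq_some s.toList this
  unfold Dom_bucket_sorter at hd
  simp only [Bool.and_eq_true, List.all_eq_true] at hd
  have := hd.1 s hs
  simp only [pvDomStr, List.all_eq_true] at this
  have hc := this ch hmem
  simp only [pvDomChar, Bool.or_eq_true, Bool.and_eq_true, beq_iff_eq,
    decide_eq_true_eq] at hc
  omega

-- ===== VERDICT (by name: the statement is the Claim_ definition above) =====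
theorem bucket_sorter_spec : Claim_equal_bucket_sorter := by
  intro strings c hd hp
  unfold Spec_bucket_sorter
  simp only [bucket_sorter, bucket_sorter_alt]
  rw [buckets_invariant c strings (fun _ => []) (dom_key_lt strings c hd hp)]
  rw [PySem.List.foldl_append_eq_flatMap (g := fun b => b),
      PySem.List.foldl_append_eq_flatMap (g := fun b => strings.filter (keyIs c b))]
  have h128 : (128 : Int) = ((128 : Nat) : Int) := by norm_num
  rw [h128, PySem.List.pyRange_zero_natCast]
  simp [List.flatMap_map]
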